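-- pv_equiv track=rewrite | github.com/jbayham/edraft | src/edraft/db_inspector.py | _order_clause
-- ===== SOURCE A (Python) =====
-- def _order_clause(columns: list[str]) -> str:
--     for column in [
--         "updated_at",
--         "evaluated_at",
--         "reply_received_timestamp",
--         "received_timestamp",
--         "received_at",
--         "sent_at",
--         "receivedDateTime",
--         "last_message_at",
--         "last_successful_sync_at",
--         "created_at",
--     ]:
--         if column in columns:
--             return f"ORDER BY {column} DESC"
--     return "ORDER BY rowid DESC"
-- ===== SOURCE B (Python) =====
-- _PRIORITY = [
--     "updated_at",
--     "evaluated_at",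
--     "reply_received_timestamp",
--     "received_timestamp",
--     "received_at",
--     "sent_at",
--     "receivedDateTime",
--     "last_message_at",
--     "last_successful_sync_at",
--     "created_at",
-- ]
-- _RANK = {c: i for i, c in enumerate(_PRIORITY)}
--
--
-- def _order_clause(columns: list[str]) -> str:
--     best = None
--     for col in columns:
--         r = _RANK.get(col)
--         if r is not None and (best is None or r < best[0]):
--             best = (r, col)
--     if best is None:
--         return "ORDER BY rowid DESC"
--     return f"ORDER BY {best[1]} DESC"
-- ===== Notes on version B (the rewrite author's own statement) =====
-- stated objective: alternative
-- what changed: B builds a rank dictionary from the 10 priority columns once and makes a single pass over the input columns tracking the minimum-rank match, instead of scanning the fixed priority list and testing membership in the input list for each entry.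
import Mathlib
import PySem

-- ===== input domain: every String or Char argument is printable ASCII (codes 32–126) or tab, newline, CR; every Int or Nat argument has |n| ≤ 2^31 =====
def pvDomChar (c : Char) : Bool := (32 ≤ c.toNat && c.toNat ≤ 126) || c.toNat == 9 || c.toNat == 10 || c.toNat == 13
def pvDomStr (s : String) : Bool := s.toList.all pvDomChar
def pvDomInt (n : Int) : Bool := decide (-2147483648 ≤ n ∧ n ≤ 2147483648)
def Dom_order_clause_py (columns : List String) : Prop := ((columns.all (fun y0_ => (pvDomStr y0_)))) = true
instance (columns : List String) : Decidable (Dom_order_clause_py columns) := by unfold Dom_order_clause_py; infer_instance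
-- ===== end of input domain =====

-- B builds a rank dict over the 10 priority columns and takes the minimum-rank match in one
-- pass over the input, instead of scanning the priority list with a membership test per entry
-- (objective: alternative; same return value).

-- ===== PORT A =====
-- A's loop over the literal priority list: first priority column present in `columns` wins.
def pvLoopA : List String → List String → String
  | [], _ => "ORDER BY rowid DESC"
  | p :: ps, columns =>
      if columns.contains p then "ORDER BY " ++ p ++ " DESC" else pvLoopA ps columns

def order_clause_py (columns : List String) : String :=
  pvLoopA
    ["updated_at", "evaluated_at", "reply_received_timestamp", "received_timestamp",
     "received_at", "sent_at", "receivedDateTime", "last_message_at",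
     "last_successful_sync_at", "created_at"]
    columns

-- ===== PORT B =====
def pvPriority : List String :=
  ["updated_at", "evaluated_at", "reply_received_timestamp", "received_timestamp",
   "received_at", "sent_at", "receivedDateTime", "last_message_at",
   "last_successful_sync_at", "created_at"]

-- _RANK = {c: i for i, c in enumerate(_PRIORITY)}
def pvRank : PySem.Dict String Int :=
  (PySem.List.enumerate pvPriority 0).foldl (fun d p => d.insert p.2 p.1) PySem.Dict.empty

-- one iteration of B's `for col in columns` loop
def pvStep (best : Option (Int × String)) (col : String) : Option (Int × String) :=
  match pvRank.get? col with
  | none => best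
  | some r =>
    match best with
    | none => some (r, col)
    | some b => if r < b.1 then some (r, col) else best

def order_clause_py_alt (columns : List String) : String :=
  match columns.foldl pvStep none with
  | none => "ORDER BY rowid DESC"
  | some b => "ORDER BY " ++ b.2 ++ " DESC"

-- ===== PRECONDITION & SPEC =====
def Spec_order_clause_py (columns : List String) (out : String) : Prop := out = order_clause_py_alt columns
instance (columns : List String) (out : String) : Decidable (Spec_order_clause_py columns out) := by unfold Spec_order_clause_py; infer_instance

-- ===== CLAIM (what is proved, stated in full; the proofs are below) =====
def Claim_equal_order_clause_py : Prop := ∀ (columns : List String), Dom_order_clause_py columns → Spec_order_clause_py columns (order_clause_py columns)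

-- ===== LEMMAS AND PROOFS =====

-- pvRank evaluated to a literal dict
theorem pvRank_eq : pvRank = PySem.Dict.mk
    [("updated_at", 0), ("evaluated_at", 1), ("reply_received_timestamp", 2),
     ("received_timestamp", 3), ("received_at", 4), ("sent_at", 5),
     ("receivedDateTime", 6), ("last_message_at", 7),
     ("last_successful_sync_at", 8), ("created_at", 9)] := by decide

-- looking up the j-th priority column gives rank j
theorem rank_at (j : Nat) (hj : j < 10) :
    pvRank.get? (pvPriority.getD j "") = some (j : Int) := by
  interval_cases j <;> decide

-- every successful lookup is an index into pvPriority
theorem rank_inv (c : String) (r : Int) (h : pvRank.get? c = some r) :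
    ∃ j : Nat, j < 10 ∧ r = (j : Int) ∧ pvPriority.getD j "" = c := by
  rw [pvRank_eq] at h
  simp only [PySem.Dict.get?_mk_cons, beq_iff_eq] at h
  split_ifs at h with h0 h1 h2 h3 h4 h5 h6 h7 h8 h9
  · exact ⟨0, by omega, by simpa using h.symm, by simp [pvPriority, h0]⟩
  · exact ⟨1, by omega, by simpa using h.symm, by simp [pvPriority, h1]⟩
  · exact ⟨2, by omega, by simpa using h.symm, by simp [pvPriority, h2]⟩
  · exact ⟨3, by omega, by simpa using h.symm, by simp [pvPriority, h3]⟩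
  · exact ⟨4, by omega, by simpa using h.symm, by simp [pvPriority, h4]⟩
  · exact ⟨5, by omega, by simpa using h.symm, by simp [pvPriority, h5]⟩
  · exact ⟨6, by omega, by simpa using h.symm, by simp [pvPriority, h6]⟩
  · exact ⟨7, by omega, by simpa using h.symm, by simp [pvPriority, h7]⟩
  · exact ⟨8, by omega, by simpa using h.symm, by simp [pvPriority, h8]⟩
  · exact ⟨9, by omega, by simpa using h.symm, by simp [pvPriority, h9]⟩
  · simp [PySem.Dict.get?] at h

-- every priority column has a rank
theorem rank_mem (p : String) (hp : p ∈ pvPriority) : pvRank.get? p ≠ none := by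
  simp only [pvPriority, List.mem_cons, List.not_mem_nil, or_false] at hp
  rcases hp with rfl | rfl | rfl | rfl | rfl | rfl | rfl | rfl | rfl | rfl <;> decide

-- A's loop is find? over the priority list
theorem loopA_eq_find (Q cols : List String) :
    pvLoopA Q cols =
      match Q.find? (fun p => decide (p ∈ cols)) with
      | some p => "ORDER BY " ++ p ++ " DESC"
      | none => "ORDER BY rowid DESC" := by
  induction Q with
  | nil => rfl
  | cons p ps ih =>
    rw [List.find?_cons]
    by_cases h : p ∈ cols <;> simp [pvLoopA, h, ih]

-- if B's fold ends with no best, nothing in cols has a rank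
theorem foldB_none (cols : List String) :
    ∀ b, cols.foldl pvStep b = none → b = none ∧ ∀ c ∈ cols, pvRank.get? c = none := by
  induction cols with
  | nil => intro b h; simpa using h
  | cons c cs ih =>
    intro b h
    obtain ⟨hstep, hrest⟩ := ih _ h
    have hc : pvRank.get? c = none ∧ b = none := by
      unfold pvStep at hstep
      cases hr : pvRank.get? c with
      | none => rw [hr] at hstep; exact ⟨rfl, hstep⟩
      | some r =>
        rw [hr] at hstep
        cases b with
        | none => simp at hstep
        | some p => by_cases hlt : r < p.1 <;> simp [hlt] at hstep
    refine ⟨hc.2, fun x hx => ?_⟩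
    rcases List.mem_cons.mp hx with rfl | hx
    · exact hc.1
    · exact hrest x hx

-- if B's fold ends with best (r, c), then (r, c) came from cols (or the seed) and r is minimal
theorem foldB_some (cols : List String) :
    ∀ b r c, cols.foldl pvStep b = some (r, c) →
      (b = some (r, c) ∨ (c ∈ cols ∧ pvRank.get? c = some r)) ∧
      (∀ c' ∈ cols, ∀ r', pvRank.get? c' = some r' → r ≤ r') ∧
      (∀ p, b = some p → r ≤ p.1) := by
  induction cols with
  | nil =>
    intro b r c h
    simp only [List.foldl_nil] at h
    exact ⟨Or.inl h, by simp, fun p hp => by rw [h] at hp; cases hp; simp⟩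
  | cons x xs ih =>
    intro b r c h
    simp only [List.foldl_cons] at h
    obtain ⟨hsrc, hmin, hseed⟩ := ih _ _ _ h
    have hstep : ∀ p, pvStep b x = some p → r ≤ p.1 := hseed
    constructor
    · -- source
      rcases hsrc with hs | ⟨hc, hr⟩
      · -- (r,c) is the post-step state
        unfold pvStep at hs
        cases hr : pvRank.get? x with
        | none => rw [hr] at hs; exact Or.inl hs
        | some rx =>
          rw [hr] at hs
          cases b with
          | none =>
            cases hs
            exact Or.inr ⟨List.mem_cons_self, hr⟩
          | some p =>
            by_cases hlt : rx < p.1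
            · simp only [if_pos hlt] at hs
              cases hs
              exact Or.inr ⟨List.mem_cons_self, hr⟩
            · simp only [if_neg hlt] at hs
              exact Or.inl hs
      · exact Or.inr ⟨List.mem_cons_of_mem _ hc, hr⟩
    constructor
    · -- minimality over x :: xs
      intro c' hc' r' hr'
      rcases List.mem_cons.mp hc' with rfl | hc'
      · -- r ≤ rank of the head element x
        have : ∀ p, pvStep b c' = some p → p.1 ≤ r' := by
          intro p hp
          unfold pvStep at hp
          rw [hr'] at hp
          cases b with
          | none => cases hp; simp
          | some q =>
            by_cases hlt : r' < q.1
            · simp only [if_pos hlt] at hp; cases hp; simp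
            · simp only [if_neg hlt] at hp; cases hp; omega
        cases hp : pvStep b c' with
        | none =>
          -- impossible: rank c' = some r' forces the step to produce some
          unfold pvStep at hp
          rw [hr'] at hp
          cases b with
          | none => simp at hp
          | some q => by_cases hlt : r' < q.1 <;> simp [hlt] at hp
        | some p => exact le_trans (hstep p hp) (this p hp)
      · exact hmin c' hc' r' hr'
    · -- r ≤ seed rank
      intro p hp
      have : ∀ q, pvStep b x = some q → q.1 ≤ p.1 := by
        intro q hq
        unfold pvStep at hq
        cases hr : pvRank.get? x with
        | none => rw [hr] at hq; rw [hp] at hq; cases hq; simp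
        | some rx =>
          rw [hr] at hq
          rw [hp] at hq
          by_cases hlt : rx < p.1
          · simp only [if_pos hlt] at hq; cases hq; omega
          · simp only [if_neg hlt] at hq; cases hq; simp
      cases hq : pvStep b x with
      | none =>
        unfold pvStep at hq
        cases hr : pvRank.get? x with
        | none => rw [hr, hp] at hq; cases hq
        | some rx =>
          rw [hr, hp] at hq
          by_cases hlt : rx < p.1 <;> simp [hlt] at hq
      | some q => exact le_trans (hstep q hq) (this q hq)

-- find? on the literal priority list from "hit at j, miss below j"
theorem find_at (cols : List String) (j : Nat) (hj : j < 10)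
    (hhit : pvPriority.getD j "" ∈ cols)
    (hmiss : ∀ k, k < j → pvPriority.getD k "" ∉ cols) :
    pvPriority.find? (fun p => decide (p ∈ cols)) = some (pvPriority.getD j "") := by
  have hlen : pvPriority.length = 10 := by decide
  have hjl : j < pvPriority.length := by omega
  rw [List.find?_eq_some_iff_getElem]
  refine ⟨by simp only [decide_eq_true_eq]; exact hhit, j, hjl, (List.getD_eq_getElem pvPriority "" hjl).symm, ?_⟩
  intro k hk
  have hkl : k < pvPriority.length := by omega
  have h := hmiss k hk
  rw [List.getD_eq_getElem pvPriority "" hkl] at h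
  simp [h]

-- ===== VERDICT (by name: the statement is the Claim_ definition above) =====
theorem order_clause_py_spec : Claim_equal_order_clause_py := by
  intro columns _
  unfold Spec_order_clause_py order_clause_py order_clause_py_alt
  rw [show
    (["updated_at", "evaluated_at", "reply_received_timestamp", "received_timestamp",
      "received_at", "sent_at", "receivedDateTime", "last_message_at",
      "last_successful_sync_at", "created_at"] : List String) = pvPriority from rfl]
  rw [loopA_eq_find]
  cases hres : columns.foldl pvStep none with
  | none =>
    obtain ⟨-, hall⟩ := foldB_none columns none hres
    have hfind : pvPriority.find? (fun p => decide (p ∈ columns)) = none := by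
      rw [List.find?_eq_none]
      intro p hp hc
      exact rank_mem p hp (hall p (by simpa using hc))
    rw [hfind]
  | some b =>
    obtain ⟨r, c⟩ := b
    obtain ⟨hsrc, hmin, -⟩ := foldB_some columns none r c hres
    rcases hsrc with hs | ⟨hc, hr⟩
    · cases hs
    obtain ⟨j, hj, rfl, hcj⟩ := rank_inv c r hr
    have hfind : pvPriority.find? (fun p => decide (p ∈ columns)) = some (pvPriority.getD j "") := by
      apply find_at columns j hj
      · rw [hcj]; exact hc
      · intro k hk hkc
        have hle : (j : Int) ≤ (k : Int) := hmin _ hkc _ (rank_at k (by omega))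
        omega
    rw [hfind, hcj]
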